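-- pv_equiv track=rewrite | github.com/MrBrantCode/unitest_baseline | mut_generate/mist_train_cf/cf_41344/solution.py | initializePokemonAttributes
-- ===== SOURCE A (Python) =====
-- from typing import List, Tuple
--
-- def initializePokemonAttributes(parent: List[str], only: List[str], genderless: List[str]) -> Tuple[List[str], List[str], List[str], List[str], List[str], List[str], List[str], List[str]]:
--     pre_Items = ["" for _ in range(2)]
--     post_Items = ["" for _ in range(2)]
--     ability = ["" for _ in range(4)]
--     Gender = ["" for _ in range(2)]
--     ball = ["" for _ in range(2)]
--     pre_ability = ["" for _ in range(4)]
--     post_ability = ["" for _ in range(4)]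
--     abilities = ["" for _ in range(4)]
--
--     for pokemon in parent:
--         pre_Items[0] = post_Items[0] = ability[0] = Gender[0] = ball[0] = pokemon
--
--     for pokemon in only:
--         pre_ability[2] = post_ability[2] = ability[1] = abilities[2] = "DREAM"
--
--     for pokemon in genderless:
--         ability[0] = "ANY"
--
--     return (pre_Items, post_Items, ability, Gender, ball, pre_ability, post_ability, abilities)
-- ===== SOURCE B (Python) =====
-- def initializePokemonAttributes(parent, only, genderless):
--     p = parent[-1] if parent else ""
--     d = "DREAM" if only else ""
--     a0 = "ANY" if genderless else p
--     return ([p, ""], [p, ""], [a0, d, "", ""], [p, ""], [p, ""],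
--             ["", "", d, ""], ["", "", d, ""], ["", "", d, ""])
-- ===== Notes on version B (the rewrite author's own statement) =====
-- stated objective: simpler
-- what changed: Replaces the three overwrite-only loops and in-place list mutation with direct construction of the eight result lists from three guarded values (last parent element, DREAM flag, ANY override).
import Mathlib
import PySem

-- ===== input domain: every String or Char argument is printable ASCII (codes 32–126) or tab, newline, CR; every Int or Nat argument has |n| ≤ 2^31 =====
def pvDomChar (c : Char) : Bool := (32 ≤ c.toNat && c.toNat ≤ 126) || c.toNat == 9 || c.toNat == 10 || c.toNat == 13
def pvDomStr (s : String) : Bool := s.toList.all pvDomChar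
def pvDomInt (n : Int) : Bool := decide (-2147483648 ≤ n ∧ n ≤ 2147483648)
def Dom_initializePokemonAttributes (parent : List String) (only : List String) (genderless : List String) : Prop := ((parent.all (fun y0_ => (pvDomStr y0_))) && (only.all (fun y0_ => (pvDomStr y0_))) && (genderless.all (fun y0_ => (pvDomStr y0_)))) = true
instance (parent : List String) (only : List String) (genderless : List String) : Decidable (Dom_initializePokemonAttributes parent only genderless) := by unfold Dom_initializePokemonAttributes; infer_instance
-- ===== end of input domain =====

-- ===== PORT A =====
-- B builds the eight lists directly from three guarded values instead of A's overwrite-only loops (objective: simpler).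
def initializePokemonAttributes (parent : List String) (only : List String) (genderless : List String) : List String × List String × List String × List String × List String × List String × List String × List String :=
  let pre_Items : List String := List.replicate 2 ""
  let post_Items : List String := List.replicate 2 ""
  let ability : List String := List.replicate 4 ""
  let Gender : List String := List.replicate 2 ""
  let ball : List String := List.replicate 2 ""
  let pre_ability : List String := List.replicate 4 ""
  let post_ability : List String := List.replicate 4 ""
  let abilities : List String := List.replicate 4 ""
  let s1 := parent.foldl
    (fun s pokemon => (s.1.set 0 pokemon, s.2.1.set 0 pokemon, s.2.2.1.set 0 pokemon,
                       s.2.2.2.1.set 0 pokemon, s.2.2.2.2.set 0 pokemon))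
    (pre_Items, post_Items, ability, Gender, ball)
  let s2 := only.foldl
    (fun s _ => (s.1.set 2 "DREAM", s.2.1.set 2 "DREAM", s.2.2.1.set 1 "DREAM", s.2.2.2.set 2 "DREAM"))
    (pre_ability, post_ability, s1.2.2.1, abilities)
  let ability3 := genderless.foldl (fun a _ => a.set 0 "ANY") s2.2.2.1
  (s1.1, s1.2.1, ability3, s1.2.2.2.1, s1.2.2.2.2, s2.1, s2.2.1, s2.2.2.2)

-- ===== PORT B =====
def initializePokemonAttributes_alt (parent : List String) (only : List String) (genderless : List String) : List String × List String × List String × List String × List String × List String × List String × List String :=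
  let p := if parent.isEmpty then "" else parent.getLastD ""
  let d := if only.isEmpty then "" else "DREAM"
  let a0 := if genderless.isEmpty then p else "ANY"
  ([p, ""], [p, ""], [a0, d, "", ""], [p, ""], [p, ""],
   ["", "", d, ""], ["", "", d, ""], ["", "", d, ""])

-- ===== PRECONDITION & SPEC =====
def Spec_initializePokemonAttributes (parent : List String) (only : List String) (genderless : List String) (out : List String × List String × List String × List String × List String × List String × List String × List String) : Prop := out = initializePokemonAttributes_alt parent only genderless
instance (parent : List String) (only : List String) (genderless : List String) (out : List String × List String × List String × List String × List String × List String × List String × List String) : Decidable (Spec_initializePokemonAttributes parent only genderless out) := by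
  unfold Spec_initializePokemonAttributes
  have d2 : DecidableEq (List String × List String) := instDecidableEqProd
  have d3 : DecidableEq (List String × List String × List String) := instDecidableEqProd
  have d4 : DecidableEq (List String × List String × List String × List String) := instDecidableEqProd
  have d5 : DecidableEq (List String × List String × List String × List String × List String) := instDecidableEqProd
  have d6 : DecidableEq (List String × List String × List String × List String × List String × List String) := instDecidableEqProd
  have d7 : DecidableEq (List String × List String × List String × List String × List String × List String × List String) := instDecidableEqProd
  have d8 : DecidableEq (List String × List String × List String × List String × List String × List String × List String × List String) := instDecidableEqProd
  exact d8 _ _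

-- ===== CLAIM (what is proved, stated in full; the proofs are below) =====
def Claim_equal_initializePokemonAttributes : Prop := ∀ (parent : List String) (only : List String) (genderless : List String), Dom_initializePokemonAttributes parent only genderless → Spec_initializePokemonAttributes parent only genderless (initializePokemonAttributes parent only genderless)

-- ===== LEMMAS AND PROOFS =====

-- an overwrite-only fold equals a single application of its body to the last element
theorem foldl_overwrite {α β : Type} (f : β → α → β)
    (hf : ∀ s a b, f (f s a) b = f s b) :
    ∀ (l : List α) (d : α) (s : β), l ≠ [] → l.foldl f s = f s (l.getLastD d) := by
  intro l
  induction l with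
  | nil => intro d s h; exact absurd rfl h
  | cons a t ih =>
    intro d s _
    cases t with
    | nil => simp [List.foldl, List.getLastD]
    | cons b u =>
      have := ih a (f s a) (by simp)
      simp [List.foldl] at this ⊢
      rw [this, hf]
      cases hgl : (b :: u).getLast? with
      | none => simp [List.getLast?_eq_none_iff] at hgl
      | some x => simp

-- ===== VERDICT (by name: the statement is the Claim_ definition above) =====
theorem initializePokemonAttributes_spec : Claim_equal_initializePokemonAttributes := by
  intro parent only genderless _
  unfold Spec_initializePokemonAttributes initializePokemonAttributes initializePokemonAttributes_alt
  have h1 := foldl_overwrite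
    (fun (s : List String × List String × List String × List String × List String) pokemon =>
      (s.1.set 0 pokemon, s.2.1.set 0 pokemon, s.2.2.1.set 0 pokemon,
       s.2.2.2.1.set 0 pokemon, s.2.2.2.2.set 0 pokemon))
    (by intro s a b; simp [List.set_set]) parent ""
  have h2 := foldl_overwrite
    (fun (s : List String × List String × List String × List String) (_ : String) =>
      (s.1.set 2 "DREAM", s.2.1.set 2 "DREAM", s.2.2.1.set 1 "DREAM", s.2.2.2.set 2 "DREAM"))
    (by intro s a b; simp [List.set_set]) only ""
  have h3 := foldl_overwrite
    (fun (a : List String) (_ : String) => a.set 0 "ANY")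
    (by intro s a b; simp [List.set_set]) genderless ""
  rcases eq_or_ne parent [] with hp | hp <;>
  rcases eq_or_ne only [] with ho | ho <;>
  rcases eq_or_ne genderless [] with hg | hg <;>
    simp_all [List.replicate, List.isEmpty_iff]
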